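-- pv_equiv track=rewrite | github.com/scrimshawlife-ctrl/Abraxas | webpanel/consideration.py | _normalize_rationale
-- ===== SOURCE A (Python) =====
-- from typing import Any, Dict, Iterable, List, Optional
--
-- def _normalize_rationale(entries: List[tuple[int, str]], limit: int = 7) -> List[str]:
--     unique = {}
--     for priority, text in entries:
--         if not text:
--             continue
--         key = (priority, text)
--         unique[key] = text
--     ordered = sorted(unique.keys(), key=lambda item: (item[0], item[1]))
--     return [unique[key] for key in ordered][:limit]
-- ===== SOURCE B (Python) =====
-- def _normalize_rationale(entries, limit=7):
--     filtered = sorted(pair for pair in entries if pair[1])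
--     out = []
--     prev = None
--     for pair in filtered:
--         if pair != prev:
--             out.append(pair[1])
--             prev = pair
--     return out[:limit]
-- ===== Notes on version B (the rewrite author's own statement) =====
-- stated objective: alternative
-- what changed: A dedupes first via a dict keyed by (priority, text) and then sorts the distinct keys; B filters, sorts the whole filtered list, and removes duplicates in a single adjacent-dedup scan over the sorted list, slicing to limit at the end.
import Mathlib
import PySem

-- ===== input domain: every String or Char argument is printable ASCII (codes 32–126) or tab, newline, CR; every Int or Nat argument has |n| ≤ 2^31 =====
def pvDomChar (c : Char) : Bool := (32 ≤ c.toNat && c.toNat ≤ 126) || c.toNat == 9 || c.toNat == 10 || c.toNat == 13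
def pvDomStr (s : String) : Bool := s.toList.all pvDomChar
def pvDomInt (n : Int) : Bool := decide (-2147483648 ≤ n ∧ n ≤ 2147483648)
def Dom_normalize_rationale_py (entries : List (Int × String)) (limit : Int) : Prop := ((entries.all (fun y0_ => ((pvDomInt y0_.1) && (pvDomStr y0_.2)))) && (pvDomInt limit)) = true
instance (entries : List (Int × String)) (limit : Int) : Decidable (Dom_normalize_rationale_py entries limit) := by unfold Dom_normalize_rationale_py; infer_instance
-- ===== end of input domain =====

-- B re-decomposes A (hash-dedup then sort) as filter → sort → adjacent-dedup scan → slice; objective: alternative decomposition, same result.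

-- ===== PORT A =====
-- dict keyed by (priority, text) with value text; overwrite keeps position (PySem.Dict).
def normalize_rationale_py (entries : List (Int × String)) (limit : Int) : List String :=
  let unique : PySem.Dict (Int × String) String :=
    entries.foldl (fun d pt => if pt.2 = "" then d else d.insert (pt.1, pt.2) pt.2) PySem.Dict.empty
  let ordered := PySem.List.sorted2 unique.keys (fun item => item.1) (fun item => item.2) false
  -- unique[key]: every key of `ordered` is a dict key, so KeyError is impossible; getD's default is never used
  PySem.List.slice (ordered.map (fun key => unique.getD key "")) none (some limit)

-- ===== PORT B =====
def normalize_rationale_py_alt (entries : List (Int × String)) (limit : Int) : List String :=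
  let filtered := PySem.List.sorted2 (entries.filter (fun pair => decide ¬(pair.2 = ""))) (fun p => p.1) (fun p => p.2) false
  let st := filtered.foldl
    (fun (st : List String × Option (Int × String)) pair =>
      if some pair = st.2 then st else (st.1 ++ [pair.2], some pair)) ([], none)
  PySem.List.slice st.1 none (some limit)

-- ===== PRECONDITION & SPEC =====
def Spec_normalize_rationale_py (entries : List (Int × String)) (limit : Int) (out : List String) : Prop := out = normalize_rationale_py_alt entries limit
instance (entries : List (Int × String)) (limit : Int) (out : List String) : Decidable (Spec_normalize_rationale_py entries limit out) := by unfold Spec_normalize_rationale_py; infer_instance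

-- ===== CLAIM (what is proved, stated in full; the proofs are below) =====
def Claim_equal_normalize_rationale_py : Prop := ∀ (entries : List (Int × String)) (limit : Int), Dom_normalize_rationale_py entries limit → Spec_normalize_rationale_py entries limit (normalize_rationale_py entries limit)

-- ===== LEMMAS AND PROOFS =====

-- Python's tuple comparison on (int, str) is the lexicographic order: both ports' sorted2 is sorted by the key toLex.
theorem pv_sorted2_eq_sorted_lex (xs : List (Int × String)) :
    PySem.List.sorted2 xs (fun p => p.1) (fun p => p.2) false
      = PySem.List.sorted xs (fun p => toLex p) := by
  rw [PySem.List.sorted_eq_foldl_insertBy]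
  have h : (fun (a b : Int × String) => decide (a.1 < b.1) || (!decide (b.1 < a.1) && decide (a.2 < b.2)))
      = (fun (a b : Int × String) => decide (toLex a < toLex b)) := by
    funext a b
    have : (toLex a < toLex b) ↔ (a.1 < b.1 ∨ a.1 = b.1 ∧ a.2 < b.2) := Prod.Lex.lt_iff
    by_cases h1 : a.1 < b.1
    · simp [h1, this]
    · by_cases h2 : b.1 < a.1
      · have hn : ¬ (toLex a < toLex b) := by
          rw [this]
          rintro (hlt | ⟨he, _⟩)
          · exact h1 hlt
          · exact absurd he.symm (ne_of_lt h2)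
        simp [h1, h2, hn]
      · have he : a.1 = b.1 := le_antisymm (le_of_not_gt h2) (le_of_not_gt h1)
        by_cases h3 : a.2 < b.2 <;> simp [h3, this, he]
  simp only [PySem.List.sorted2, Bool.false_eq_true, if_false, h]

-- the dict loop's value at any stored item is the key's text component
theorem pv_dict_val (l : List (Int × String)) (d : PySem.Dict (Int × String) String)
    (hv : ∀ pr ∈ d.items, pr.2 = pr.1.2) :
    ∀ pr ∈ (l.foldl (fun d pt => d.insert (pt.1, pt.2) pt.2) d).items, pr.2 = pr.1.2 := by
  induction l generalizing d with
  | nil => exact hv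
  | cons x xs ih =>
    refine ih _ (fun pr hpr => ?_)
    rcases (PySem.Dict.mem_items_insert d (x.1, x.2) x.2 pr).mp hpr with h | h
    · subst h; rfl
    · exact hv pr h.1

-- adjacent-dedup of B's scan, extracted as a recursion
def pvAdj : Option (Int × String) → List (Int × String) → List (Int × String)
  | _, [] => []
  | prev, x :: xs => if some x = prev then pvAdj prev xs else x :: pvAdj (some x) xs

theorem pv_fold_adj (l : List (Int × String)) (out : List String) (prev : Option (Int × String)) :
    (l.foldl (fun (st : List String × Option (Int × String)) pair =>
        if some pair = st.2 then st else (st.1 ++ [pair.2], some pair)) (out, prev)).1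
      = out ++ (pvAdj prev l).map (·.2) := by
  induction l generalizing out prev with
  | nil => simp [pvAdj]
  | cons x xs ih =>
    by_cases h : some x = prev
    · simp [pvAdj, h, ih]
    · simp [pvAdj, h, ih, List.append_assoc]

theorem pv_adj_mem (l : List (Int × String))
    (hl : l.Pairwise (fun a b => toLex a ≤ toLex b)) :
    ∀ (prev : Option (Int × String)), (∀ p, prev = some p → ∀ x ∈ l, toLex p ≤ toLex x) →
      ∀ y, (y ∈ pvAdj prev l ↔ y ∈ l ∧ ∀ p, prev = some p → y ≠ p) := by
  induction l with
  | nil => intro prev _ y; simp [pvAdj]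
  | cons x xs ih =>
    intro prev hp y
    have hx : ∀ z ∈ xs, toLex x ≤ toLex z := (List.pairwise_cons.mp hl).1
    have hxs : xs.Pairwise (fun a b => toLex a ≤ toLex b) := (List.pairwise_cons.mp hl).2
    by_cases h : some x = prev
    · have hih := ih hxs prev (fun p hp' z hz => hp p hp' z (List.mem_cons_of_mem _ hz)) y
      simp only [pvAdj, if_pos h, hih]
      subst h
      constructor
      · rintro ⟨hy, hne⟩; exact ⟨List.mem_cons_of_mem _ hy, hne⟩
      · rintro ⟨hy, hne⟩
        rcases List.mem_cons.mp hy with rfl | hy'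
        · exact absurd rfl (hne y rfl)
        · exact ⟨hy', hne⟩
    · have hih := ih hxs (some x) (fun p hp' z hz => by injection hp' with h'; subst h'; exact hx z hz) y
      simp only [pvAdj, if_neg h]
      constructor
      · intro hy
        rcases List.mem_cons.mp hy with rfl | hy'
        · refine ⟨List.mem_cons_self, fun p hp' hyp => ?_⟩
          exact h (by rw [hp', hyp])
        · rcases (hih.mp hy') with ⟨hyxs, hne⟩
          refine ⟨List.mem_cons_of_mem _ hyxs, fun p hp' hyp => ?_⟩
          subst hyp
          have h1 : toLex y ≤ toLex x := hp y hp' x List.mem_cons_self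
          have h2 : toLex x ≤ toLex y := hx y hyxs
          exact hne x rfl (toLex_inj.mp (le_antisymm h2 h1)).symm
      · rintro ⟨hy, hne⟩
        rcases List.mem_cons.mp hy with rfl | hy'
        · exact List.mem_cons_self
        · by_cases hyx : y = x
          · subst hyx; exact List.mem_cons_self
          · exact List.mem_cons_of_mem _ (hih.mpr ⟨hy', fun p hp' => by cases hp'; exact hyx⟩)

theorem pv_adj_pairwise (l : List (Int × String))
    (hl : l.Pairwise (fun a b => toLex a ≤ toLex b)) :
    ∀ (prev : Option (Int × String)), (∀ p, prev = some p → ∀ x ∈ l, toLex p ≤ toLex x) →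
      (pvAdj prev l).Pairwise (fun a b => toLex a < toLex b) := by
  induction l with
  | nil => intro prev _; simp [pvAdj]
  | cons x xs ih =>
    intro prev hp
    have hx : ∀ z ∈ xs, toLex x ≤ toLex z := (List.pairwise_cons.mp hl).1
    have hxs : xs.Pairwise (fun a b => toLex a ≤ toLex b) := (List.pairwise_cons.mp hl).2
    by_cases h : some x = prev
    · simpa [pvAdj, if_pos h] using
        ih hxs prev (fun p hp' z hz => hp p hp' z (List.mem_cons_of_mem _ hz))
    · rw [pvAdj, if_neg h]
      refine List.pairwise_cons.mpr ⟨?_, ih hxs (some x) (fun p hp' z hz => by injection hp' with h'; subst h'; exact hx z hz)⟩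
      intro y hy
      rcases (pv_adj_mem xs hxs (some x) (fun p hp' z hz => by injection hp' with h'; subst h'; exact hx z hz) y).mp hy with ⟨hyxs, hne⟩
      exact lt_of_le_of_ne (hx y hyxs) (fun he => hne x rfl (toLex_inj.mp he).symm)

-- core: sorting the deduped list equals adjacent-dedup of the sorted list
theorem pv_core (F : List (Int × String)) :
    PySem.List.sorted (PySem.List.dedup F) (fun p => toLex p)
      = pvAdj none (PySem.List.sorted F (fun p => toLex p)) := by
  set S := PySem.List.sorted F (fun p => toLex p) with hS
  have hSp : S.Pairwise (fun a b => toLex a ≤ toLex b) := PySem.List.sorted_pairwise F _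
  have hnone : ∀ p, (none : Option (Int × String)) = some p → ∀ x ∈ S, toLex p ≤ toLex x := by
    intro p hp; cases hp
  have hmem : ∀ y, y ∈ pvAdj none S ↔ y ∈ S := by
    intro y
    rw [pv_adj_mem S hSp none hnone y]
    simp
  have hpw : (pvAdj none S).Pairwise (fun a b => toLex a < toLex b) :=
    pv_adj_pairwise S hSp none hnone
  refine PySem.List.sorted_eq_of_perm_of_pairwise_lt _ _ _ ?_ hpw
  refine (List.perm_ext_iff_of_nodup ?_ (PySem.List.nodup_dedup F)).mpr ?_
  · exact hpw.imp (fun h => fun he => absurd (he ▸ h) (lt_irrefl _))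
  · intro a
    rw [hmem a, PySem.List.mem_dedup, hS, PySem.List.mem_sorted]

-- ===== VERDICT (by name: the statement is the Claim_ definition above) =====
theorem normalize_rationale_py_spec : Claim_equal_normalize_rationale_py := by
  intro entries limit _
  show normalize_rationale_py entries limit = normalize_rationale_py_alt entries limit
  unfold normalize_rationale_py normalize_rationale_py_alt
  dsimp only
  set F := entries.filter (fun pair => decide ¬(pair.2 = "")) with hF
  -- rewrite A's guarded fold as a fold over F
  have hfold : entries.foldl (fun d pt => if pt.2 = "" then d else d.insert (pt.1, pt.2) pt.2)
      (PySem.Dict.empty : PySem.Dict (Int × String) String)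
      = F.foldl (fun d pt => d.insert (pt.1, pt.2) pt.2) PySem.Dict.empty := by
    have heq := PySem.List.foldl_ite_eq_foldl_filter
      (p := fun pt : Int × String => ¬(pt.2 = ""))
      (f := fun (d : PySem.Dict (Int × String) String) pt => d.insert (pt.1, pt.2) pt.2)
      (l := entries) (init := PySem.Dict.empty)
    rw [hF, ← heq]
    refine PySem.List.foldl_congr_mem _ _ _ _ (fun d pt _ => ?_)
    by_cases h : pt.2 = "" <;> simp [h]
  rw [hfold]
  set d := F.foldl (fun d pt => d.insert (pt.1, pt.2) pt.2)
    (PySem.Dict.empty : PySem.Dict (Int × String) String) with hd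
  have hkeys : d.keys = PySem.List.dedup F := by
    rw [hd, PySem.Dict.keys_foldl_insert_key F (fun pt => (pt.1, pt.2)) (fun _ pt => pt.2)]
    simp [PySem.List.dedup_eq_ofList, PySem.Set.update, PySem.Set.ofList]
  have hnd : d.keys.Nodup := by
    rw [hkeys]; exact PySem.List.nodup_dedup F
  have hval : ∀ k ∈ d.keys, d.getD k "" = k.2 := by
    intro k hk
    simp only [PySem.Dict.keys] at hk
    rcases List.mem_map.mp hk with ⟨pr, hpr, hfst⟩
    have hv : pr.2 = pr.1.2 := pv_dict_val F PySem.Dict.empty (by simp [PySem.Dict.empty]) pr hpr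
    have : (k, pr.2) ∈ d.items := by
      have : pr = (k, pr.2) := by rw [← hfst]
      exact this ▸ hpr
    rw [PySem.Dict.getD_of_mem_items d this hnd "", hv, hfst]
  -- both sorts are sorted-by-toLex
  rw [pv_sorted2_eq_sorted_lex, pv_sorted2_eq_sorted_lex, hkeys, pv_core F, pv_fold_adj]
  simp only [List.nil_append]
  congr 1
  refine List.map_congr_left (fun k hk => ?_)
  have hkS : k ∈ PySem.List.sorted (PySem.List.dedup F) (fun p => toLex p) := by
    rw [pv_core F]; exact hk
  have : k ∈ d.keys := by
    rw [hkeys, ← PySem.List.mem_sorted (PySem.List.dedup F) (fun p => toLex p) false]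
    exact hkS
  exact hval k this
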